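-- pv_equiv track=rewrite | github.com/garvonious-ui/cuervo-intel | pages/5_Hashtag_&_Search_Intel.py | _get_opps_actions
-- ===== SOURCE A (Python) =====
-- def _get_opps_actions(report):
--     """Extract paired opportunities and strategic actions from hashtag_analysis.
--     Arrays are interleaved: [insight, action, insight, action, ...]."""
--     if not report:
--         return []
--     ha = report.get("hashtag_analysis", {})
--     opps = ha.get("opportunities", [])
--     actions = ha.get("strategic_actions", [])
--     pairs = []
--     for i in range(0, max(len(opps), len(actions)), 2):
--         insight = opps[i] if i < len(opps) else ""
--         action = opps[i + 1] if i + 1 < len(opps) else ""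
--         gap = actions[i] if i < len(actions) else ""
--         response = actions[i + 1] if i + 1 < len(actions) else ""
--         pairs.append({
--             "opportunity": insight,
--             "how": action,
--             "gap": gap,
--             "response": response,
--         })
--     return pairs
-- ===== SOURCE B (Python) =====
-- def _chunk2(xs):
--     """Group a flat interleaved list into (first, second) pairs, padding a lone tail with ""."""
--     xs = list(xs)
--     if not xs:
--         return []
--     if len(xs) == 1:
--         return [(xs[0], "")]
--     return [(xs[0], xs[1])] + _chunk2(xs[2:])
--
--
-- def _zip_pad(ps, qs):
--     """zip the two pair-lists to equal length, padding the shorter with ("", "")."""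
--     if not ps and not qs:
--         return []
--     p = ps[0] if ps else ("", "")
--     q = qs[0] if qs else ("", "")
--     return [(p, q)] + _zip_pad(ps[1:], qs[1:])
--
--
-- def _get_opps_actions(report):
--     if not report:
--         return []
--     ha = report.get("hashtag_analysis", {})
--     merged = _zip_pad(_chunk2(ha.get("opportunities", [])),
--                       _chunk2(ha.get("strategic_actions", [])))
--     return [{"opportunity": o, "how": h, "gap": g, "response": r}
--             for (o, h), (g, r) in merged]
-- ===== Notes on version B (the rewrite author's own statement) =====
-- stated objective: alternative
-- what changed: Replaces A's index loop over range(0, max(len,len), 2) with four guarded lookups per step by chunking each array into consecutive (first, second) pairs (padding a lone tail with "") and zipping the two chunk lists with (("" , "")) padding, then mapping each merged pair to the dict.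
import Mathlib
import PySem

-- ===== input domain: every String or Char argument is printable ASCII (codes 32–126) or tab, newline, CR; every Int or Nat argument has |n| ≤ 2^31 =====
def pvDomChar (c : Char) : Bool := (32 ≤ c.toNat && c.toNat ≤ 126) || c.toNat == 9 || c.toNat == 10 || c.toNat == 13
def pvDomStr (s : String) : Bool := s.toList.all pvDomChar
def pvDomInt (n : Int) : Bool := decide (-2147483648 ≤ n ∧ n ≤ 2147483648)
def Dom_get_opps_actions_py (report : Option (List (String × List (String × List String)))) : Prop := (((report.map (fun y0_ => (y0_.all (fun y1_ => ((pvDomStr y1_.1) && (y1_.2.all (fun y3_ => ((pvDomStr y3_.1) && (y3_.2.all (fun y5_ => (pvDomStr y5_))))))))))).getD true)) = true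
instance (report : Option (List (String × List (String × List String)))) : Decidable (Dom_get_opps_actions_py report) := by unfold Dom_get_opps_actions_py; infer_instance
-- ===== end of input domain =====

-- B re-implements the index loop as chunk-into-pairs + zip-with-padding (different decomposition, same cost); return value only.

-- ===== PORT A =====
-- one row of A's loop body: the four guarded lookups at index i
def pvRowA (opps actions : List String) (i : Int) : List (String × String) :=
  let insight := if i < (opps.length : Int) then PySem.List.pyGetD opps i "" else ""
  let action := if i + 1 < (opps.length : Int) then PySem.List.pyGetD opps (i + 1) "" else ""
  let gap := if i < (actions.length : Int) then PySem.List.pyGetD actions i "" else ""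
  let response := if i + 1 < (actions.length : Int) then PySem.List.pyGetD actions (i + 1) "" else ""
  [("opportunity", insight), ("how", action), ("gap", gap), ("response", response)]

def get_opps_actions_py (report : Option (List (String × List (String × List String)))) : List (List (String × String)) :=
  match report with
  | none => []
  | some r =>
    if r.isEmpty then [] else
      let ha := PySem.Dict.getD (PySem.Dict.ofList r) "hashtag_analysis" []
      let opps := PySem.Dict.getD (PySem.Dict.ofList ha) "opportunities" []
      let actions := PySem.Dict.getD (PySem.Dict.ofList ha) "strategic_actions" []
      (PySem.List.pyRange 0 (max (opps.length : Int) (actions.length : Int)) 2).foldl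
        (fun acc i => acc ++ [pvRowA opps actions i]) []

-- ===== PORT B =====
def pvChunk2 : List String → List (String × String)
  | [] => []
  | [a] => [(a, "")]
  | a :: b :: rest => (a, b) :: pvChunk2 rest

def pvZipPad : List (String × String) → List (String × String) → List ((String × String) × (String × String))
  | [], [] => []
  | [], q :: qs => (("", ""), q) :: pvZipPad [] qs
  | p :: ps, [] => (p, ("", "")) :: pvZipPad ps []
  | p :: ps, q :: qs => (p, q) :: pvZipPad ps qs

def pvMkRow (pq : (String × String) × (String × String)) : List (String × String) :=
  [("opportunity", pq.1.1), ("how", pq.1.2), ("gap", pq.2.1), ("response", pq.2.2)]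

def get_opps_actions_py_alt (report : Option (List (String × List (String × List String)))) : List (List (String × String)) :=
  match report with
  | none => []
  | some r =>
    if r.isEmpty then [] else
      let ha := PySem.Dict.getD (PySem.Dict.ofList r) "hashtag_analysis" []
      let opps := PySem.Dict.getD (PySem.Dict.ofList ha) "opportunities" []
      let actions := PySem.Dict.getD (PySem.Dict.ofList ha) "strategic_actions" []
      (pvZipPad (pvChunk2 opps) (pvChunk2 actions)).map pvMkRow

-- ===== PRECONDITION & SPEC =====
def Spec_get_opps_actions_py (report : Option (List (String × List (String × List String)))) (out : List (List (String × String))) : Prop := out = get_opps_actions_py_alt report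
instance (report : Option (List (String × List (String × List String)))) (out : List (List (String × String))) : Decidable (Spec_get_opps_actions_py report out) := by unfold Spec_get_opps_actions_py; infer_instance

-- ===== CLAIM (what is proved, stated in full; the proofs are below) =====
def Claim_equal_get_opps_actions_py : Prop := ∀ (report : Option (List (String × List (String × List String)))), Dom_get_opps_actions_py report → Spec_get_opps_actions_py report (get_opps_actions_py report)

-- ===== LEMMAS AND PROOFS =====

-- first element of a chunked list (value-level description of (pvChunk2 xs).headD)
def pvHead2 : List String → String × String
  | [] => ("", "")
  | [a] => (a, "")
  | a :: b :: _ => (a, b)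

lemma pvZipPad_chunk_cons (opps actions : List String) (h : opps ≠ [] ∨ actions ≠ []) :
    pvZipPad (pvChunk2 opps) (pvChunk2 actions) =
      (pvHead2 opps, pvHead2 actions) :: pvZipPad (pvChunk2 (opps.drop 2)) (pvChunk2 (actions.drop 2)) := by
  rcases opps with _ | ⟨a, _ | ⟨b, o⟩⟩ <;> rcases actions with _ | ⟨c, _ | ⟨d, q⟩⟩ <;>
    simp_all [pvChunk2, pvZipPad, pvHead2]

lemma pvRowA_zero (opps actions : List String) :
    pvRowA opps actions 0 = pvMkRow (pvHead2 opps, pvHead2 actions) := by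
  rcases opps with _ | ⟨a, _ | ⟨b, o⟩⟩ <;> rcases actions with _ | ⟨c, _ | ⟨d, q⟩⟩ <;>
    simp [pvRowA, pvMkRow, pvHead2, PySem.List.pyGetD, PySem.List.pyGet?, PySem.List.pyIdx?,
      show ∀ n : ℕ, (0:ℤ) ≤ (n:ℤ) + 1 from fun n => by positivity]

lemma pvGetD_shift (xs : List String) (i : Int) (hi : 0 ≤ i) (d : String) :
    PySem.List.pyGetD xs (i + 2) d = PySem.List.pyGetD (xs.drop 2) i d := by
  lift i to ℕ using hi with k
  have e2 : (k : Int) + 2 = ((k + 2 : ℕ) : Int) := by push_cast; ring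
  rw [e2, PySem.List.pyGetD_natCast, PySem.List.pyGetD_natCast]
  simp [List.getD_eq_getElem?_getD, List.getElem?_drop, Nat.add_comm]

lemma pvRowA_shift (opps actions : List String) (i : Int) (hi : 0 ≤ i) :
    pvRowA opps actions (i + 2) = pvRowA (opps.drop 2) (actions.drop 2) i := by
  have g1 : ∀ xs : List String, PySem.List.pyGetD xs (i + 2 + 1) "" = PySem.List.pyGetD (xs.drop 2) (i + 1) "" := by
    intro xs
    have : i + 2 + 1 = (i + 1) + 2 := by ring
    rw [this, pvGetD_shift xs (i + 1) (by omega)]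
  have h1 : ∀ xs : List String, (i < ((xs.drop 2).length : Int)) = (i + 2 < (xs.length : Int)) := by
    intro xs; simp only [List.length_drop]; rw [eq_iff_iff]; omega
  have h2 : ∀ xs : List String, (i + 1 < ((xs.drop 2).length : Int)) = (i + 2 + 1 < (xs.length : Int)) := by
    intro xs; simp only [List.length_drop]; rw [eq_iff_iff]; omega
  simp only [pvRowA, pvGetD_shift _ i hi, g1, h1, h2]

lemma pvMain : ∀ (n : Nat) (opps actions : List String), opps.length + actions.length ≤ n →
    (List.range ((max opps.length actions.length + 1) / 2)).map
        (fun (k : Nat) => pvRowA opps actions (2 * (k : Int)))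
      = (pvZipPad (pvChunk2 opps) (pvChunk2 actions)).map pvMkRow := by
  intro n
  induction n with
  | zero =>
    intro opps actions h
    have ho : opps = [] := List.eq_nil_of_length_eq_zero (by omega)
    have ha : actions = [] := List.eq_nil_of_length_eq_zero (by omega)
    subst ho ha; simp [pvChunk2, pvZipPad]
  | succ n ih =>
    intro opps actions h
    by_cases hne : opps = [] ∧ actions = []
    · obtain ⟨ho, ha⟩ := hne; subst ho ha; simp [pvChunk2, pvZipPad]
    · have hlen : opps ≠ [] ∨ actions ≠ [] := by tauto
      have hpos : 1 ≤ max opps.length actions.length := by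
        rcases hlen with h' | h'
        · exact le_trans (List.length_pos_iff.mpr h') (le_max_left _ _)
        · exact le_trans (List.length_pos_iff.mpr h') (le_max_right _ _)
      have hm : (max opps.length actions.length + 1) / 2
          = (max (opps.drop 2).length (actions.drop 2).length + 1) / 2 + 1 := by
        simp only [List.length_drop]; omega
      rw [hm, List.range_succ_eq_map, List.map_cons, List.map_map]
      have hcast : ∀ k : ℕ, pvRowA opps actions (2 * ((k + 1 : ℕ) : Int))
          = pvRowA (opps.drop 2) (actions.drop 2) (2 * (k : Int)) := by
        intro k
        have : (2 : Int) * ((k + 1 : ℕ) : Int) = 2 * (k : Int) + 2 := by push_cast; ring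
        rw [this, pvRowA_shift _ _ _ (by positivity)]
      have hmap : List.map ((fun (k : Nat) => pvRowA opps actions (2 * (k : Int))) ∘ Nat.succ)
            (List.range ((max (opps.drop 2).length (actions.drop 2).length + 1) / 2))
          = List.map (fun (k : Nat) => pvRowA (opps.drop 2) (actions.drop 2) (2 * (k : Int)))
            (List.range ((max (opps.drop 2).length (actions.drop 2).length + 1) / 2)) := by
        apply List.map_congr_left
        intro k _
        simpa using hcast k
      rw [hmap, ih _ _ (by simp only [List.length_drop]; omega)]
      rw [pvZipPad_chunk_cons _ _ hlen, List.map_cons]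
      congr 1
      simpa using pvRowA_zero opps actions

lemma pvBody (opps actions : List String) :
    (PySem.List.pyRange 0 (max (opps.length : Int) (actions.length : Int)) 2).foldl
        (fun acc i => acc ++ [pvRowA opps actions i]) []
      = (pvZipPad (pvChunk2 opps) (pvChunk2 actions)).map pvMkRow := by
  rw [PySem.List.foldl_append_singleton_eq_map, List.nil_append,
      PySem.List.pyRange_of_pos _ _ (by norm_num : (0:Int) < 2)]
  have hc : (if (0:Int) < max (opps.length : Int) (actions.length : Int)
      then ((max (opps.length : Int) (actions.length : Int) - 0 + 2 - 1) / 2).toNat else 0)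
      = (max opps.length actions.length + 1) / 2 := by
    rw [Int.max_def]
    split_ifs <;> omega
  rw [hc, List.map_map]
  have := pvMain (opps.length + actions.length) opps actions le_rfl
  rw [← this]
  apply List.map_congr_left
  intro k _
  simp

-- ===== VERDICT (by name: the statement is the Claim_ definition above) =====
theorem get_opps_actions_py_spec : Claim_equal_get_opps_actions_py := by
  intro report _
  unfold Spec_get_opps_actions_py get_opps_actions_py get_opps_actions_py_alt
  match report with
  | none => rfl
  | some r =>
    simp only
    split
    · rfl
    · exact pvBody _ _
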